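-- pv_equiv track=rewrite | github.com/nd5a/Leetcode-problems | Day305.py | spellchecker
-- ===== SOURCE A (Python) =====
-- def spellchecker(wordlist, queries):
--     seen = set(wordlist)
--     caps = {}
--     vows = {}
--
--     def norm(w):
--         ans = []
--         for c in w.lower():
--             if c in "aeiou":
--                 ans.append("*")
--             else:
--                 ans.append(c)
--         return "".join(ans)
--
--     for word in reversed(wordlist):
--         caps[word.lower()] = word
--         vows[norm(word)] = word
--
--     ans = []
--     for q in queries:
--         if q in seen:
--             ans.append(q)
--             continue
--
--         if q.lower() in caps:
--             ans.append(caps[q.lower()])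
--             continue
--
--         vnorm = norm(q)
--         if vnorm in vows:
--             ans.append(vows[vnorm])
--             continue
--
--         ans.append("")
--     return ans
-- ===== SOURCE B (Python) =====
-- def spellchecker(wordlist, queries):
--     def norm(w):
--         return "".join("*" if c in "aeiou" else c for c in w.lower())
--
--     def answer(q):
--         if q in wordlist:
--             return q
--         ql = q.lower()
--         cap = next((w for w in wordlist if w.lower() == ql), None)
--         if cap is not None:
--             return cap
--         qn = norm(q)
--         return next((w for w in wordlist if norm(w) == qn), "")
--
--     return [answer(q) for q in queries]
-- ===== Notes on version B (the rewrite author's own statement) =====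
-- stated objective: simpler
-- what changed: Replaces the set plus the two dictionaries built from the reversed wordlist by a per-query forward first-match scan (next over a generator) whose earliest-wins order directly encodes the reversed-dict tie-breaking.
import Mathlib
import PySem

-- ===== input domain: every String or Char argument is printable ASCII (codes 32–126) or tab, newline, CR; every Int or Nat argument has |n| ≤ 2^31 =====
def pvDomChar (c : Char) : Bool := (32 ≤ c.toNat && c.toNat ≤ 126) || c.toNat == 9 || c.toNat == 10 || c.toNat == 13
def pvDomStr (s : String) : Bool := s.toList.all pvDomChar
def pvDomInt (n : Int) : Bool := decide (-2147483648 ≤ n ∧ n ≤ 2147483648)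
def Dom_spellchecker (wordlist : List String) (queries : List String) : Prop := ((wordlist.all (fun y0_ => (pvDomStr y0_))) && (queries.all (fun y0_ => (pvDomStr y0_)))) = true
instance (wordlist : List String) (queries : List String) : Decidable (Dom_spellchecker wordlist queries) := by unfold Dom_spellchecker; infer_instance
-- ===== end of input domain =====

-- B replaces A's set + two reversed-insertion dictionaries by a per-query forward first-match scan
-- (exact > case-insensitive > vowel-normalized); simpler decomposition, not faster.


-- ===== PORT A =====
-- A's helper norm: builds a list of one-character strings and joins it
def normA (w : String) : String :=
  PySem.Str.join ""
    ((PySem.Str.lower w).toList.foldl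
      (fun ans c => ans ++ [if (['a','e','i','o','u'] : List Char).contains c then "*" else String.ofList [c]])
      [])

def spellchecker (wordlist : List String) (queries : List String) : List String :=
  let seen := PySem.Set.ofList wordlist
  let cv := wordlist.reverse.foldl
      (fun (s : PySem.Dict String String × PySem.Dict String String) word =>
        (s.1.insert (PySem.Str.lower word) word, s.2.insert (normA word) word))
      (PySem.Dict.empty, PySem.Dict.empty)
  let caps := cv.1
  let vows := cv.2
  queries.foldl
    (fun ans q =>
      if seen.contains q then ans ++ [q]
      else if caps.contains (PySem.Str.lower q) then ans ++ [caps.getD (PySem.Str.lower q) ""]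
      else
        let vnorm := normA q
        if vows.contains vnorm then ans ++ [vows.getD vnorm ""]
        else ans ++ [""])
    []

-- ===== PORT B =====
-- B's helper norm: a map over the lowered characters
def normB (w : String) : String :=
  String.ofList ((PySem.Str.lower w).toList.map
    (fun c => if (['a','e','i','o','u'] : List Char).contains c then '*' else c))

def spellchecker_alt (wordlist : List String) (queries : List String) : List String :=
  queries.map (fun q =>
    if wordlist.contains q then q
    else
      let ql := PySem.Str.lower q
      match wordlist.find? (fun w => PySem.Str.lower w == ql) with
      | some w => w
      | none =>
        let qn := normB q
        match wordlist.find? (fun w => normB w == qn) with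
        | some w => w
        | none => "")

-- ===== PRECONDITION & SPEC =====
def Spec_spellchecker (wordlist : List String) (queries : List String) (out : List String) : Prop := out = spellchecker_alt wordlist queries
instance (wordlist : List String) (queries : List String) (out : List String) : Decidable (Spec_spellchecker wordlist queries out) := by unfold Spec_spellchecker; infer_instance

-- ===== CLAIM (what is proved, stated in full; the proofs are below) =====
def Claim_equal_spellchecker : Prop := ∀ (wordlist : List String) (queries : List String), Dom_spellchecker wordlist queries → Spec_spellchecker wordlist queries (spellchecker wordlist queries)

-- ===== LEMMAS AND PROOFS =====

-- the two norm helpers agree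
theorem normA_eq_normB (w : String) : normA w = normB w := by
  unfold normA normB
  rw [← String.toList_inj, PySem.Str.toList_join]
  have h : ∀ (acc : List String) (cs : List Char),
      cs.foldl (fun ans c => ans ++ [if (['a','e','i','o','u'] : List Char).contains c then "*" else String.ofList [c]]) acc
        = acc ++ cs.map (fun c => if (['a','e','i','o','u'] : List Char).contains c then "*" else String.ofList [c]) := by
    intro acc cs
    induction cs generalizing acc with
    | nil => simp
    | cons c cs ih => rw [List.foldl_cons, ih, List.map_cons]; simp
  rw [h]
  simp only [List.nil_append, List.map_map]
  have h2 : (List.map (String.toList ∘ fun c => if (['a','e','i','o','u'] : List Char).contains c then "*" else String.ofList [c]) (PySem.Str.lower w).toList)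
      = List.map (fun c => [c]) ((PySem.Str.lower w).toList.map (fun c => if (['a','e','i','o','u'] : List Char).contains c then '*' else c)) := by
    rw [List.map_map]
    apply List.map_congr_left
    intro c _
    simp only [Function.comp_apply]
    split_ifs <;> simp
  rw [h2]
  have := PySem.Chars.join_nil_singletons ((PySem.Str.lower w).toList.map (fun c => if (['a','e','i','o','u'] : List Char).contains c then '*' else c))
  simp only [List.map_map] at this ⊢
  rw [show ("" : String).toList = [] from rfl, this]
  simp

-- lookup in a dict built by inserting over the REVERSED list = first forward match
theorem get?_rev_foldl (f : String → String) (l : List String) (d : PySem.Dict String String) (k : String) :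
    (l.reverse.foldl (fun d w => d.insert (f w) w) d).get? k
      = match l.find? (fun w => f w == k) with
        | some w => some w
        | none => d.get? k := by
  induction l generalizing d with
  | nil => simp
  | cons w ws ih =>
    rw [List.reverse_cons, List.foldl_append]
    simp only [List.foldl_cons, List.foldl_nil]
    rw [PySem.Dict.get?_insert, List.find?_cons]
    by_cases hw : f w = k
    · simp [hw]
    · have hbe : (f w == k) = false := by simp [hw]
      simp only [hbe, if_neg (fun h : k = f w => hw h.symm)]
      exact ih d

-- appending loop = map
theorem foldl_append_map {α β : Type} (g : α → β) (l : List α) (acc : List β) :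
    l.foldl (fun ans q => ans ++ [g q]) acc = acc ++ l.map g := by
  induction l generalizing acc with
  | nil => simp
  | cons q qs ih => simp [List.foldl_cons, ih]

-- proof-only abbreviation for A's per-query value
def gA (wordlist : List String) (q : String) : String :=
  if (PySem.Set.ofList wordlist).contains q = true then q
  else if (wordlist.reverse.foldl (fun d w => d.insert (PySem.Str.lower w) w) PySem.Dict.empty).contains (PySem.Str.lower q) = true
    then (wordlist.reverse.foldl (fun d w => d.insert (PySem.Str.lower w) w) PySem.Dict.empty).getD (PySem.Str.lower q) ""
  else if (wordlist.reverse.foldl (fun d w => d.insert (normA w) w) PySem.Dict.empty).contains (normA q) = true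
    then (wordlist.reverse.foldl (fun d w => d.insert (normA w) w) PySem.Dict.empty).getD (normA q) ""
  else ""

theorem spellchecker_eq (wordlist queries : List String) :
    spellchecker wordlist queries = spellchecker_alt wordlist queries := by
  unfold spellchecker spellchecker_alt
  dsimp only
  rw [PySem.List.foldl_prod_mk
      (f := fun d word => PySem.Dict.insert d (PySem.Str.lower word) word)
      (g := fun d word => PySem.Dict.insert d (normA word) word)]
  dsimp only
  have hb : (List.foldl
      (fun (ans : List String) q =>
        if (PySem.Set.ofList wordlist).contains q = true then ans ++ [q]
        else if (wordlist.reverse.foldl (fun d w => d.insert (PySem.Str.lower w) w) PySem.Dict.empty).contains (PySem.Str.lower q) = true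
          then ans ++ [(wordlist.reverse.foldl (fun d w => d.insert (PySem.Str.lower w) w) PySem.Dict.empty).getD (PySem.Str.lower q) ""]
        else if (wordlist.reverse.foldl (fun d w => d.insert (normA w) w) PySem.Dict.empty).contains (normA q) = true
          then ans ++ [(wordlist.reverse.foldl (fun d w => d.insert (normA w) w) PySem.Dict.empty).getD (normA q) ""]
        else ans ++ [""]) [] queries)
      = List.foldl (fun ans q => ans ++ [gA wordlist q]) [] queries := by
    congr 1
    funext ans q
    unfold gA
    split_ifs <;> rfl
  rw [hb, foldl_append_map]
  simp only [List.nil_append]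
  apply List.map_congr_left
  intro q _
  unfold gA
  have hset : PySem.Set.contains (PySem.Set.ofList wordlist) q = wordlist.contains q := by
    rw [Bool.eq_iff_iff]
    simp [PySem.Set.mem_ofList]
  rw [hset]
  by_cases hq : wordlist.contains q
  · simp only [hq, if_true]
  · simp only [hq, Bool.false_eq_true, if_false]
    rw [PySem.Dict.contains_eq_isSome_get?, PySem.Dict.getD_eq_get?_getD,
        PySem.Dict.contains_eq_isSome_get?, PySem.Dict.getD_eq_get?_getD,
        get?_rev_foldl, get?_rev_foldl]
    cases h1 : wordlist.find? (fun w => PySem.Str.lower w == PySem.Str.lower q) with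
    | some w => simp
    | none =>
      simp only [PySem.Dict.get?_empty, Option.isSome_none, Bool.false_eq_true, if_false]
      have hnn : (fun w => normA w == normA q) = (fun w => normB w == normB q) := by
        funext w; rw [normA_eq_normB, normA_eq_normB]
      rw [hnn]
      cases h2 : wordlist.find? (fun w => normB w == normB q) with
      | some w => simp
      | none => simp

-- ===== VERDICT (by name: the statement is the Claim_ definition above) =====
theorem spellchecker_spec : Claim_equal_spellchecker := by
  intro wordlist queries _
  unfold Spec_spellchecker
  exact spellchecker_eq wordlist queries
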